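-- pv_equiv track=rewrite | github.com/AlexsOrtiz/ocr-backend | app/services/ocr_service.py | expand_ambiguous_suffix
-- ===== SOURCE A (Python) =====
-- SUFFIX_CONFUSIONS = {
--     "O": ("0", "O"), "Q": ("0", "Q"), "I": ("1", "I"), "L": ("1", "L"),
--     "Z": ("2", "Z"), "A": ("4", "A"), "H": ("4", "H"), "T": ("7", "T"),
--     "B": ("8", "B"), "G": ("8", "6", "G"), "S": ("8", "5", "S"),
-- }
--
-- def expand_ambiguous_suffix(suffix: str, limit: int = 24) -> list[str]:
--     candidates = [""]
--     for char in suffix.upper():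
--         options = SUFFIX_CONFUSIONS.get(char, (char,))
--         next_candidates = []
--         for base in candidates:
--             for option in options:
--                 next_candidates.append(base + option)
--                 if len(next_candidates) >= limit:
--                     break
--             if len(next_candidates) >= limit:
--                 break
--         candidates = next_candidates or candidates
--     return candidates
-- ===== SOURCE B (Python) =====
-- SUFFIX_CONFUSIONS = {
--     "O": ("0", "O"), "Q": ("0", "Q"), "I": ("1", "I"), "L": ("1", "L"),
--     "Z": ("2", "Z"), "A": ("4", "A"), "H": ("4", "H"), "T": ("7", "T"),
--     "B": ("8", "B"), "G": ("8", "6", "G"), "S": ("8", "5", "S"),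
-- }
--
-- def expand_ambiguous_suffix(suffix: str, limit: int = 24) -> list[str]:
--     n = max(limit, 1)  # always keep at least one candidate
--     def combos(chars: str) -> list[str]:
--         if not chars:
--             return [""]
--         options = SUFFIX_CONFUSIONS.get(chars[0], (chars[0],))
--         tails = combos(chars[1:])
--         return [o + t for o in options for t in tails][:n]
--     return combos(suffix.upper())
-- ===== Notes on version B (the rewrite author's own statement) =====
-- stated objective: simpler
-- what changed: Replaced A's imperative build-and-truncate fold (nested loops with post-append breaks and an 'or' fallback) by a short recursive cartesian-product expansion that truncates each level to max(limit, 1).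
import Mathlib
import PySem

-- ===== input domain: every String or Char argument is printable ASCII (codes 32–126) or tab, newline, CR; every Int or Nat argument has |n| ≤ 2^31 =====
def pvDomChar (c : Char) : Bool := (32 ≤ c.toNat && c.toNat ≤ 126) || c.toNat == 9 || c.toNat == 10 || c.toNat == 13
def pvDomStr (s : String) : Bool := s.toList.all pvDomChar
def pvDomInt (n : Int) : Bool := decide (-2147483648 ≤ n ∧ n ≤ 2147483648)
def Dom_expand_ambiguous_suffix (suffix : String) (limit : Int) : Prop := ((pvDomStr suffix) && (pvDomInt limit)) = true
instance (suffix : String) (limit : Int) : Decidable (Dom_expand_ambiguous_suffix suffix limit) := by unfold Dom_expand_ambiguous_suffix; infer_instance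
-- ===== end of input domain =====

-- B replaces A's incremental build-and-truncate fold with a recursive cartesian-product
-- expansion truncated to max(limit, 1) at each level (objective: simpler).


-- ===== PORT A =====
-- module constant SUFFIX_CONFUSIONS (shared context of both Pythons)
def SUFFIX_CONFUSIONS : PySem.Dict String (List String) := PySem.Dict.ofList
  [("O", ["0","O"]), ("Q", ["0","Q"]), ("I", ["1","I"]), ("L", ["1","L"]),
   ("Z", ["2","Z"]), ("A", ["4","A"]), ("H", ["4","H"]), ("T", ["7","T"]),
   ("B", ["8","B"]), ("G", ["8","6","G"]), ("S", ["8","5","S"])]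

-- SUFFIX_CONFUSIONS.get(char, (char,)), used by both Pythons
def conf (c : Char) : List String :=
  SUFFIX_CONFUSIONS.getD (String.singleton c) [String.singleton c]

-- inner 'for option in options' loop with its post-append break
def innerA (limit : Int) (base : String) : List String → List String → List String
  | [], acc => acc
  | opt :: rest, acc =>
      let acc' := acc ++ [base ++ opt]
      if (acc'.length : Int) ≥ limit then acc' else innerA limit base rest acc'

-- outer 'for base in candidates' loop with its break
def outerA (limit : Int) (options : List String) : List String → List String → List String
  | [], acc => acc
  | base :: rest, acc =>
      let acc' := innerA limit base options acc
      if (acc'.length : Int) ≥ limit then acc' else outerA limit options rest acc'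

def expand_ambiguous_suffix (suffix : String) (limit : Int) : List String :=
  (PySem.Str.upper suffix).toList.foldl
    (fun candidates char =>
      let next_candidates := outerA limit (conf char) candidates []
      if next_candidates = [] then candidates else next_candidates)
    [""]

-- ===== PORT B =====
-- combos(chars): truncated cartesian product, built from the right
def combosB (n : Nat) : List Char → List String
  | [] => [""]
  | c :: rest =>
      let options := conf c
      let tails := combosB n rest
      (options.flatMap (fun o => tails.map (fun t => o ++ t))).take n

def expand_ambiguous_suffix_alt (suffix : String) (limit : Int) : List String :=
  combosB (max limit 1).toNat (PySem.Str.upper suffix).toList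

-- ===== PRECONDITION & SPEC =====
def Spec_expand_ambiguous_suffix (suffix : String) (limit : Int) (out : List String) : Prop := out = expand_ambiguous_suffix_alt suffix limit
instance (suffix : String) (limit : Int) (out : List String) : Decidable (Spec_expand_ambiguous_suffix suffix limit out) := by unfold Spec_expand_ambiguous_suffix; infer_instance

-- ===== CLAIM (what is proved, stated in full; the proofs are below) =====
def Claim_equal_expand_ambiguous_suffix : Prop := ∀ (suffix : String) (limit : Int), Dom_expand_ambiguous_suffix suffix limit → Spec_expand_ambiguous_suffix suffix limit (expand_ambiguous_suffix suffix limit)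

-- ===== LEMMAS AND PROOFS =====

-- the literal dict reduced
theorem SUFFIX_CONFUSIONS_mk : SUFFIX_CONFUSIONS = PySem.Dict.mk
  [("O", ["0","O"]), ("Q", ["0","Q"]), ("I", ["1","I"]), ("L", ["1","L"]),
   ("Z", ["2","Z"]), ("A", ["4","A"]), ("H", ["4","H"]), ("T", ["7","T"]),
   ("B", ["8","B"]), ("G", ["8","6","G"]), ("S", ["8","5","S"])] := by decide

theorem conf_ne (c : Char) : conf c ≠ [] := by
  unfold conf
  rw [SUFFIX_CONFUSIONS_mk, PySem.Dict.getD_eq_get?_getD]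
  simp [PySem.Dict.get?, List.find?_cons]
  repeat' split
  all_goals simp

-- threshold bridge: 'len >= limit' under the clamp n = max(limit, 1)
theorem limit_iff (limit : Int) (k : Nat) (hk : 1 ≤ k) :
    ((k : Int) ≥ limit) ↔ (max limit 1).toNat ≤ k := by omega

theorem one_le_n (limit : Int) : 1 ≤ (max limit 1).toNat := by omega

theorem flatMap_ne_nil {α β : Type} (P : List α) (f : α → List β) (hP : P ≠ [])
    (hf : ∀ x, f x ≠ []) : P.flatMap f ≠ [] := by
  simp only [ne_eq, List.flatMap_eq_nil_iff]
  intro h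
  rcases List.exists_mem_of_ne_nil P hP with ⟨x, hx⟩
  exact hf x (h x hx)

theorem take_ne_nil {α : Type} (l : List α) (n : Nat) (hl : l ≠ []) (hn : 1 ≤ n) :
    l.take n ≠ [] := by
  cases l with
  | nil => exact absurd rfl hl
  | cons a t => cases n with
    | zero => omega
    | succ m => simp

theorem innerA_eq (limit : Int) (base : String) (opts : List String) :
    ∀ acc : List String, acc.length < (max limit 1).toNat →
      innerA limit base opts acc
        = (acc ++ opts.map (fun o => base ++ o)).take (max limit 1).toNat := by
  induction opts with
  | nil =>
      intro acc h
      simp [innerA, List.take_of_length_le (Nat.le_of_lt h)]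
  | cons opt rest ih =>
      intro acc h
      rw [innerA]
      have hassoc : acc ++ (opt :: rest).map (fun o => base ++ o)
          = (acc ++ [base ++ opt]) ++ rest.map (fun o => base ++ o) := by simp
      by_cases hc : ((acc ++ [base ++ opt]).length : Int) ≥ limit
      · have h1 : (max limit 1).toNat ≤ (acc ++ [base ++ opt]).length :=
          (limit_iff limit _ (by simp)).mp hc
        have h2 : (acc ++ [base ++ opt]).length = (max limit 1).toNat := by
          simp at h1 ⊢; omega
        rw [if_pos hc, hassoc, List.take_append, ← h2, List.take_length, Nat.sub_self]
        simp
      · have h1 : (acc ++ [base ++ opt]).length < (max limit 1).toNat := by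
          have := (limit_iff limit (acc ++ [base ++ opt]).length (by simp)).not.mp hc
          omega
        rw [if_neg hc, ih _ h1]
        simp

theorem outerA_eq (limit : Int) (opts : List String) (hopts : opts ≠ []) :
    ∀ (cands acc : List String), acc.length < (max limit 1).toNat →
      outerA limit opts cands acc
        = (acc ++ cands.flatMap (fun b => opts.map (fun o => b ++ o))).take (max limit 1).toNat := by
  intro cands
  induction cands with
  | nil =>
      intro acc h
      simp [outerA, List.take_of_length_le (Nat.le_of_lt h)]
  | cons b rest ih =>
      intro acc h
      rw [outerA, innerA_eq limit b opts acc h]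
      set n := (max limit 1).toNat with hn
      have hlen1 : 1 ≤ ((acc ++ opts.map (fun o => b ++ o)).take n).length := by
        rw [List.length_take]
        have : 1 ≤ opts.length := List.length_pos_of_ne_nil hopts
        simp only [List.length_append, List.length_map]
        have := one_le_n limit
        omega
      by_cases hc : ((((acc ++ opts.map (fun o => b ++ o)).take n).length : Int)) ≥ limit
      · have h1 : n ≤ ((acc ++ opts.map (fun o => b ++ o)).take n).length :=
          (limit_iff limit _ hlen1).mp hc
        have h2 : n ≤ (acc ++ opts.map (fun o => b ++ o)).length := by
          rw [List.length_take] at h1; omega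
        rw [if_pos hc]
        have hsplit : acc ++ (b :: rest).flatMap (fun b => opts.map (fun o => b ++ o))
            = (acc ++ opts.map (fun o => b ++ o)) ++ rest.flatMap (fun b => opts.map (fun o => b ++ o)) := by
          simp
        rw [hsplit]
        simp only [List.take_append]
        rw [Nat.sub_eq_zero_of_le h2]
        simp
      · have h1 : ((acc ++ opts.map (fun o => b ++ o)).take n).length < n := by
          have := (limit_iff limit _ hlen1).not.mp hc
          omega
        have h2 : (acc ++ opts.map (fun o => b ++ o)).length < n := by
          rw [List.length_take] at h1; omega
        rw [if_neg hc, List.take_of_length_le (Nat.le_of_lt h2), ih _ h2]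
        simp

-- truncating the bases before expanding does not change the first n results
theorem takeFlat {α β : Type} (f : α → List β) (hf : ∀ x, f x ≠ []) :
    ∀ (P : List α) (k m : Nat), k ≤ m →
      ((P.take m).flatMap f).take k = (P.flatMap f).take k := by
  intro P
  induction P with
  | nil => intro k m _; simp
  | cons b t ih =>
      intro k m hkm
      cases m with
      | zero =>
          have : k = 0 := by omega
          simp [this]
      | succ m' =>
          rw [List.take_succ_cons, List.flatMap_cons, List.flatMap_cons,
            List.take_append, List.take_append]
          have hlen : 1 ≤ (f b).length := List.length_pos_of_ne_nil (hf b)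
          rw [ih (k - (f b).length) m' (by omega)]

-- truncating the tails before prefixing does not change the first n results
theorem innerTrunc (opts L : List String) (n : Nat) :
    ((opts.flatMap fun o => (L.take n).map (fun t => o ++ t)).take n)
      = ((opts.flatMap fun o => L.map (fun t => o ++ t)).take n) := by
  by_cases h : L.length ≤ n
  · rw [List.take_of_length_le h]
  · cases opts with
    | nil => rfl
    | cons o rest =>
        rw [List.flatMap_cons, List.flatMap_cons,
          List.take_append, List.take_append]
        have h1 : (((L.take n).map (fun t => o ++ t)).length) = n := by
          simp; omega
        have h2 : n ≤ ((L.map (fun t => o ++ t)).length) := by simp; omega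
        have e1 : n - ((L.take n).map (fun t => o ++ t)).length = 0 := by omega
        have e2 : n - (L.map (fun t => o ++ t)).length = 0 := by omega
        rw [e1, e2]
        simp [List.map_take, List.take_take]

-- full left-nested product, as A builds it
def extL : List String → List Char → List String
  | P, [] => P
  | P, c :: cs => extL (P.flatMap (fun b => (conf c).map (fun o => b ++ o))) cs

-- full right-nested product, as B builds it
def prodJ : List Char → List String
  | [] => [""]
  | c :: cs => (conf c).flatMap (fun o => (prodJ cs).map (fun t => o ++ t))

theorem extL_eq : ∀ (cs : List Char) (P : List String),
    extL P cs = P.flatMap (fun b => (prodJ cs).map (fun t => b ++ t)) := by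
  intro cs
  induction cs with
  | nil => intro P; simp [extL, prodJ]
  | cons c cs ih =>
      intro P
      rw [extL, ih, prodJ]
      simp [List.flatMap_assoc, List.flatMap_map, List.map_flatMap, List.map_map,
        Function.comp_def, String.append_assoc]

-- A's fold, characterised: the state is always 'first n of the full product so far'
theorem foldA_eq (limit : Int) :
    ∀ (cs : List Char) (P cand : List String), P ≠ [] →
      cand = P.take (max limit 1).toNat →
      cs.foldl
        (fun candidates char =>
          let next_candidates := outerA limit (conf char) candidates []
          if next_candidates = [] then candidates else next_candidates)
        cand
      = (extL P cs).take (max limit 1).toNat := by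
  intro cs
  induction cs with
  | nil => intro P cand _ hc; simpa [extL] using hc
  | cons c cs ih =>
      intro P cand hP hc
      have hn1 : 1 ≤ (max limit 1).toNat := one_le_n limit
      have hcand : cand ≠ [] := by
        rw [hc]; exact take_ne_nil _ _ hP hn1
      have houter : outerA limit (conf c) cand []
          = (cand.flatMap (fun b => (conf c).map (fun o => b ++ o))).take (max limit 1).toNat := by
        rw [outerA_eq limit (conf c) (conf_ne c) cand [] (by simp)]
        simp
      have hP' : P.flatMap (fun b => (conf c).map (fun o => b ++ o)) ≠ [] :=
        flatMap_ne_nil _ _ hP (fun b => by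
          simp only [ne_eq, List.map_eq_nil_iff]; exact conf_ne c)
      have hnc : outerA limit (conf c) cand []
          = (P.flatMap (fun b => (conf c).map (fun o => b ++ o))).take (max limit 1).toNat := by
        rw [houter, hc, takeFlat _ (fun b => by
          simp only [ne_eq, List.map_eq_nil_iff]; exact conf_ne c) P _ _ le_rfl]
      have hne : outerA limit (conf c) cand [] ≠ [] := by
        rw [hnc]; exact take_ne_nil _ _ hP' hn1
      rw [List.foldl_cons]
      have hstep : (let next_candidates := outerA limit (conf c) cand []
            if next_candidates = [] then cand else next_candidates)
          = outerA limit (conf c) cand [] := by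
        simp [hne]
      rw [hstep, extL]
      exact ih _ _ hP' hnc

theorem combosB_eq (n : Nat) (hn : 1 ≤ n) :
    ∀ cs : List Char, combosB n cs = (prodJ cs).take n := by
  intro cs
  induction cs with
  | nil =>
      rw [combosB, prodJ]
      cases n with
      | zero => omega
      | succ m => simp
  | cons c cs ih =>
      rw [combosB, prodJ]
      simp only [ih]
      exact innerTrunc (conf c) (prodJ cs) n

-- ===== VERDICT (by name: the statement is the Claim_ definition above) =====
theorem expand_ambiguous_suffix_spec : Claim_equal_expand_ambiguous_suffix := by
  intro suffix limit _
  unfold Spec_expand_ambiguous_suffix expand_ambiguous_suffix expand_ambiguous_suffix_alt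
  set n := (max limit 1).toNat with hn
  have hn1 : 1 ≤ n := one_le_n limit
  rw [foldA_eq limit _ [""] [""] (by simp)
    (by cases hh : n with
        | zero => omega
        | succ m => simp)]
  rw [combosB_eq n hn1, extL_eq]
  congr 1
  simp
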